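-- pv_equiv track=rewrite | github.com/anthonytk31415/leetcode | python-fundamentals/profitableSchemes.py | profitableSchemes1
-- ===== SOURCE A (Python) =====
-- from functools import lru_cache
--
-- def profitableSchemes1(n, minProfit, group, profit):
--
--     res = 0
--     curGroup = tuple([i for i in range(len(group))])
--
--     if minProfit == 0:
--         res +=1
--
--     @lru_cache(None)
--     def dfs(curGroup, n, curProfit):
--         res = 0
--         if n == 0 or not curGroup:
--             return res
--
--         for i in range(len(curGroup)):
--             idx = curGroup[i]
--             if n >= group[idx]:
--                 newProfit = curProfit + profit[idx]
--                 if newProfit >= minProfit: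
--                     res +=1
--                 newGroup = tuple(curGroup[i+1:])
--                 res += dfs(newGroup, n - group[idx], newProfit)
--
--         return res
--
--     res += dfs(curGroup, n, 0)
--     return res % (10**9 + 7)
-- ===== SOURCE B (Python) =====
-- def profitableSchemes1(n, minProfit, group, profit):
--     MOD = 10 ** 9 + 7
--     res = 1 if minProfit == 0 else 0
--     # states maps (remaining members, profit so far) -> number of schemes reaching it
--     states = {(n, 0): 1}
--     for g, p in zip(group, profit):
--         additions = []
--         for (rem, cur), cnt in states.items():
--             if rem != 0 and rem >= g:
--                 np = cur + p
--                 if np >= minProfit: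
--                     res += cnt
--                 additions.append(((rem - g, np), cnt))
--         for key, cnt in additions:
--             states[key] = states.get(key, 0) + cnt
--     return res % MOD
-- ===== Notes on version B (the rewrite author's own statement) =====
-- stated objective: alternative
-- what changed: A's top-down memoized DFS over suffixes of the index tuple is replaced by a single forward pass over the items that maintains a dictionary counting schemes per reachable (remaining-members, profit-so-far) state, merging states instead of recursing.
-- outside the precondition, e.g. on profitableSchemes1(0, 5, [1], []): A returns 0, B returns 0
import Mathlib
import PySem

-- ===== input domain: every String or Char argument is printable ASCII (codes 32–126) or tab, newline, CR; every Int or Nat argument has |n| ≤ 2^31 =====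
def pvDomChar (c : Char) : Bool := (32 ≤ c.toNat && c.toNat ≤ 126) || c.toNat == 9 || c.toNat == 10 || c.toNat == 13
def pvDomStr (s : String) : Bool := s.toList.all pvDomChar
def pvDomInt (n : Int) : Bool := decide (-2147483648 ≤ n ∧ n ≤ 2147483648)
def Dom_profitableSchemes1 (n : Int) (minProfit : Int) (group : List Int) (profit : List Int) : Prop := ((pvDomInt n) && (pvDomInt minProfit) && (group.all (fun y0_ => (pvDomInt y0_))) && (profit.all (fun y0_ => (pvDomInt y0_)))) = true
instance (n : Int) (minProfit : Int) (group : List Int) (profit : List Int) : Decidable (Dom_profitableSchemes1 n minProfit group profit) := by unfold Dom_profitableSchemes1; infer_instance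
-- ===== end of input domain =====

-- B replaces A's memoized DFS over index-suffixes by a single forward pass keeping a
-- dictionary of reachable (remaining-members, profit-so-far) states with multiplicities
-- (objective: alternative algorithm; states with equal (remaining, profit) are merged).

-- ===== PORT A =====
-- A's dfs: check n == 0 / empty tuple, then loop over the index tuple, either picking
-- index idx (when n >= group[idx]) or moving on; lru_cache only memoizes a pure function,
-- so the plain recursion computes the same value.
-- the loop body of A's dfs, structurally recursive on the index tuple; the recursive
-- call dfs(newGroup, n - group[idx], newProfit) is transcribed with dfs's entry test
-- `n == 0 or not curGroup` inlined at the call site (pvDfsA below is that test + loop)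
def pvDfsAGo (group profit : List Int) (minProfit : Int) : List Int → Int → Int → Int
  | [], _, _ => 0
  | idx :: rest, n, curProfit =>
    (if n ≥ PySem.List.pyGetD group idx 0 then
      (if curProfit + PySem.List.pyGetD profit idx 0 ≥ minProfit then 1 else 0)
        + (if n - PySem.List.pyGetD group idx 0 = 0 ∨ rest = [] then 0
           else pvDfsAGo group profit minProfit rest (n - PySem.List.pyGetD group idx 0)
                  (curProfit + PySem.List.pyGetD profit idx 0))
     else 0) + pvDfsAGo group profit minProfit rest n curProfit

-- A's dfs: entry test, then the loop over the index tuple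
def pvDfsA (group profit : List Int) (minProfit : Int) (curGroup : List Int) (n curProfit : Int) : Int :=
  if n = 0 ∨ curGroup = [] then 0
  else pvDfsAGo group profit minProfit curGroup n curProfit

def profitableSchemes1 (n : Int) (minProfit : Int) (group : List Int) (profit : List Int) : Int :=
  let res : Int := if minProfit = 0 then 1 else 0
  PySem.Int.mod (res + pvDfsA group profit minProfit (PySem.List.pyRange 0 (group.length : Int) 1) n 0) (10 ^ 9 + 7)

-- ===== PORT B =====
-- one item (g, p) of B's outer loop: scan states.items() accumulating res and the
-- additions list, then merge the additions back into the dictionary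
def pvStepB (minProfit : Int) (st : Int × PySem.Dict (Int × Int) Int) (gp : Int × Int) :
    Int × PySem.Dict (Int × Int) Int :=
  let acc := st.2.items.foldl
    (fun (acc : Int × List ((Int × Int) × Int)) item =>
      if item.1.1 ≠ 0 ∧ item.1.1 ≥ gp.1 then
        ((if item.1.2 + gp.2 ≥ minProfit then acc.1 + item.2 else acc.1),
         acc.2 ++ [((item.1.1 - gp.1, item.1.2 + gp.2), item.2)])
      else acc) (st.1, ([] : List ((Int × Int) × Int)))
  (acc.1, acc.2.foldl (fun d kc => d.insert kc.1 (d.getD kc.1 0 + kc.2)) st.2)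

def profitableSchemes1_alt (n : Int) (minProfit : Int) (group : List Int) (profit : List Int) : Int :=
  let res0 : Int := if minProfit = 0 then 1 else 0
  let states : PySem.Dict (Int × Int) Int := PySem.Dict.empty.insert (n, 0) 1
  let fin := (group.zip profit).foldl (pvStepB minProfit) (res0, states)
  PySem.Int.mod fin.1 (10 ^ 9 + 7)

-- ===== PRECONDITION & SPEC =====
-- Pre_ excludes inputs with len(profit) < len(group): on those A raises IndexError whenever
-- a pick reaching a missing profit entry is feasible (and on the remaining such inputs, where
-- no such pick is feasible, A returns and B agrees — they are excluded only to keep Pre_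
-- closed-form).
def Pre_profitableSchemes1 (n : Int) (minProfit : Int) (group : List Int) (profit : List Int) : Prop :=
  group.length ≤ profit.length
instance (n : Int) (minProfit : Int) (group : List Int) (profit : List Int) : Decidable (Pre_profitableSchemes1 n minProfit group profit) := by unfold Pre_profitableSchemes1; infer_instance

def pvWitness_profitableSchemes1 : Int × Int × List Int × List Int := (3, 2, [1, 2], [2, 1])

def Spec_profitableSchemes1 (n : Int) (minProfit : Int) (group : List Int) (profit : List Int) (out : Int) : Prop := out = profitableSchemes1_alt n minProfit group profit
instance (n : Int) (minProfit : Int) (group : List Int) (profit : List Int) (out : Int) : Decidable (Spec_profitableSchemes1 n minProfit group profit out) := by unfold Spec_profitableSchemes1; infer_instance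

-- ===== CLAIM (what is proved, stated in full; the proofs are below) =====
def Claim_equal_profitableSchemes1 : Prop := ∀ (n : Int) (minProfit : Int) (group : List Int) (profit : List Int), Dom_profitableSchemes1 n minProfit group profit → Pre_profitableSchemes1 n minProfit group profit → Spec_profitableSchemes1 n minProfit group profit (profitableSchemes1 n minProfit group profit)

-- ===== LEMMAS AND PROOFS =====

-- the common semantics: the number of counted picks over the item list, from state s
def pvF (minProfit : Int) : List (Int × Int) → Int × Int → Int
  | [], _ => 0
  | gp :: rest, s =>
    (if s.1 ≠ 0 ∧ s.1 ≥ gp.1 then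
       (if s.2 + gp.2 ≥ minProfit then 1 else 0) + pvF minProfit rest (s.1 - gp.1, s.2 + gp.2)
     else 0) + pvF minProfit rest s

lemma pvF_zero (minProfit : Int) (items : List (Int × Int)) (cur : Int) :
    pvF minProfit items (0, cur) = 0 := by
  induction items with
  | nil => rfl
  | cons gp rest ih => simp [pvF, ih]

-- A-side bridge: the loop over the index range from j equals pvF over the zipped suffix
lemma pvA_bridge (group profit : List Int) (minProfit : Int)
    (hlen : group.length ≤ profit.length) :
    ∀ (m j : Nat), group.length - j = m → ∀ rem cur : Int, rem ≠ 0 →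
      pvDfsAGo group profit minProfit (PySem.List.pyRange (j : Int) (group.length : Int) 1) rem cur
        = pvF minProfit ((group.zip profit).drop j) (rem, cur) := by
  intro m
  induction m with
  | zero =>
    intro j hj rem cur _
    have hge : (group.length : Int) ≤ (j : Int) := by exact_mod_cast Nat.le_of_sub_eq_zero hj
    have h1 : PySem.List.pyRange (j : Int) (group.length : Int) 1 = [] :=
      PySem.List.pyRange_one_eq_nil hge
    have h2 : (group.zip profit).drop j = [] := by
      apply List.drop_eq_nil_of_le
      simp only [List.length_zip]
      omega
    rw [h1, h2]
    simp [pvDfsAGo, pvF]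
  | succ m ih =>
    intro j hj rem cur hrem
    have hjlt : j < group.length := by omega
    have hjp : j < profit.length := by omega
    have hrange : PySem.List.pyRange (j : Int) (group.length : Int) 1
        = (j : Int) :: PySem.List.pyRange ((j : Int) + 1) (group.length : Int) 1 :=
      PySem.List.pyRange_one_cons (by exact_mod_cast hjlt)
    have hcast : ((j : Int) + 1) = ((j + 1 : Nat) : Int) := by push_cast; ring
    have hjz : j < (group.zip profit).length := by
      simp only [List.length_zip]; omega
    have hdrop : (group.zip profit).drop j
        = (group[j], profit[j]) :: (group.zip profit).drop (j + 1) := by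
      rw [List.drop_eq_getElem_cons hjz]
      congr 1
      exact List.getElem_zip
    have hg : PySem.List.pyGetD group ((j : Nat) : Int) 0 = group[j] := by
      rw [PySem.List.pyGetD_natCast]
      exact List.getD_eq_getElem group 0 hjlt
    have hp : PySem.List.pyGetD profit ((j : Nat) : Int) 0 = profit[j] := by
      rw [PySem.List.pyGetD_natCast]
      exact List.getD_eq_getElem profit 0 hjp
    have hjm : group.length - (j + 1) = m := by omega
    rw [hrange]
    simp only [pvDfsAGo, hg, hp, hcast]
    rw [hdrop]
    simp only [pvF]
    have hpick : (if rem - group[j] = 0 ∨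
          PySem.List.pyRange ((j + 1 : Nat) : Int) (group.length : Int) 1 = [] then 0
        else pvDfsAGo group profit minProfit
          (PySem.List.pyRange ((j + 1 : Nat) : Int) (group.length : Int) 1)
          (rem - group[j]) (cur + profit[j]))
        = pvF minProfit ((group.zip profit).drop (j + 1)) (rem - group[j], cur + profit[j]) := by
      by_cases hz : rem - group[j] = 0
      · rw [if_pos (Or.inl hz), hz, pvF_zero]
      · by_cases hemp : group.length ≤ j + 1
        · have hnil : PySem.List.pyRange ((j + 1 : Nat) : Int) (group.length : Int) 1 = [] :=
            PySem.List.pyRange_one_eq_nil (by exact_mod_cast hemp)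
          have hdnil : (group.zip profit).drop (j + 1) = [] := by
            apply List.drop_eq_nil_of_le
            simp only [List.length_zip]
            omega
          rw [if_pos (Or.inr hnil), hdnil]
          simp [pvF]
        · have hcons : PySem.List.pyRange ((j + 1 : Nat) : Int) (group.length : Int) 1
              = ((j + 1 : Nat) : Int) :: PySem.List.pyRange (((j + 1 : Nat) : Int) + 1)
                  (group.length : Int) 1 :=
            PySem.List.pyRange_one_cons (by exact_mod_cast (by omega : j + 1 < group.length))
          rw [if_neg (by rw [hcons]; simp [hz])]
          exact ih (j + 1) hjm (rem - group[j]) (cur + profit[j]) hz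
    rw [hpick, ih (j + 1) hjm rem cur hrem]
    by_cases hge : rem ≥ group[j]
    · rw [if_pos hge, if_pos (show rem ≠ 0 ∧ rem ≥ group[j] from ⟨hrem, hge⟩)]
    · rw [if_neg hge, if_neg (show ¬(rem ≠ 0 ∧ rem ≥ group[j]) from fun hco => hge hco.2)]

-- A's dfs from the full index range equals pvF over the zipped items
lemma pvA_dfs (group profit : List Int) (minProfit : Int)
    (hlen : group.length ≤ profit.length) (rem cur : Int) :
    pvDfsA group profit minProfit (PySem.List.pyRange 0 (group.length : Int) 1) rem cur
      = pvF minProfit (group.zip profit) (rem, cur) := by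
  by_cases hrem : rem = 0
  · subst hrem
    rw [pvDfsA, if_pos (Or.inl rfl), pvF_zero]
  · by_cases hlen0 : group.length = 0
    · have hnil : PySem.List.pyRange 0 (group.length : Int) 1 = [] :=
        PySem.List.pyRange_one_eq_nil (by simp [hlen0])
      have hznil : group.zip profit = [] := by
        cases group with
        | nil => simp
        | cons a t => simp at hlen0
      rw [pvDfsA, if_pos (Or.inr hnil), hznil]
      simp [pvF]
    · have hcons : PySem.List.pyRange ((0 : Nat) : Int) (group.length : Int) 1
          = ((0 : Nat) : Int) :: PySem.List.pyRange (((0 : Nat) : Int) + 1)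
              (group.length : Int) 1 :=
        PySem.List.pyRange_one_cons (by exact_mod_cast Nat.pos_of_ne_zero hlen0)
      have hz : ((0 : Nat) : Int) = (0 : Int) := rfl
      rw [hz] at hcons
      rw [pvDfsA, if_neg (by rw [hcons]; simp [hrem])]
      have := pvA_bridge group profit minProfit hlen (group.length - 0) 0 rfl rem cur hrem
      rw [hz] at this
      rw [this, List.drop_zero]

-- B-side: weighted sum of a state list under a valuation
def pvWs (l : List ((Int × Int) × Int)) (h : Int × Int → Int) : Int :=
  (l.map (fun kv => kv.2 * h kv.1)).sum

-- the additions list produced from the state list l by item (g, p)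
def pvPicks (g p : Int) (l : List ((Int × Int) × Int)) : List ((Int × Int) × Int) :=
  l.filterMap (fun item =>
    if item.1.1 ≠ 0 ∧ item.1.1 ≥ g then some ((item.1.1 - g, item.1.2 + p), item.2) else none)

-- the res increment produced from the state list l by item (g, p)
def pvResAdd (minProfit g p : Int) (l : List ((Int × Int) × Int)) : Int :=
  (l.map (fun item =>
    if item.1.1 ≠ 0 ∧ item.1.1 ≥ g then (if item.1.2 + p ≥ minProfit then item.2 else 0)
    else 0)).sum

lemma pvStepB_inner (minProfit g p : Int) :
    ∀ (l : List ((Int × Int) × Int)) (r : Int) (adds : List ((Int × Int) × Int)),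
      l.foldl (fun (acc : Int × List ((Int × Int) × Int)) item =>
        if item.1.1 ≠ 0 ∧ item.1.1 ≥ g then
          ((if item.1.2 + p ≥ minProfit then acc.1 + item.2 else acc.1),
           acc.2 ++ [((item.1.1 - g, item.1.2 + p), item.2)])
        else acc) (r, adds)
      = (r + pvResAdd minProfit g p l, adds ++ pvPicks g p l) := by
  intro l
  induction l with
  | nil => intro r adds; simp [pvResAdd, pvPicks]
  | cons item t ih =>
    intro r adds
    by_cases h1 : item.1.1 ≠ 0 ∧ item.1.1 ≥ g
    · by_cases h2 : item.1.2 + p ≥ minProfit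
      · rw [List.foldl_cons, if_pos h1, if_pos h2, ih]
        simp only [pvResAdd, pvPicks, List.map_cons, List.sum_cons, List.filterMap_cons,
          if_pos h1, if_pos h2, List.append_assoc, List.singleton_append, Prod.mk.injEq]
        exact ⟨by ring, trivial⟩
      · rw [List.foldl_cons, if_pos h1, if_neg h2, ih]
        simp only [pvResAdd, pvPicks, List.map_cons, List.sum_cons, List.filterMap_cons,
          if_pos h1, if_neg h2, List.append_assoc, List.singleton_append, Prod.mk.injEq]
        exact ⟨by ring, trivial⟩
    · rw [List.foldl_cons, if_neg h1, ih]
      simp only [pvResAdd, pvPicks, List.map_cons, List.sum_cons, List.filterMap_cons,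
        if_neg h1, Prod.mk.injEq]
      exact ⟨by ring, trivial⟩

-- replacing the unique entry with key k by (k, q.2 + c) adds c * h k to the weighted sum
lemma pvWs_replace (k : Int × Int) (c : Int) (h : Int × Int → Int) :
    ∀ (l : List ((Int × Int) × Int)) (q : (Int × Int) × Int),
      (l.map (·.1)).Nodup → l.find? (fun pr => pr.1 == k) = some q →
      pvWs (l.map (fun pr => if pr.1 == k then (k, q.2 + c) else pr)) h
        = pvWs l h + c * h k := by
  intro l
  induction l with
  | nil => intro q _ hf; simp at hf
  | cons pr t ih =>
    intro q hnd hf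
    by_cases hk : pr.1 = k
    · have hq : q = pr := by
        rw [List.find?_cons_of_pos (by simp [hk])] at hf
        exact (Option.some.inj hf).symm
      have hnot : ∀ x ∈ t, x.1 ≠ k := by
        intro x hx hxk
        exact (List.nodup_cons.mp hnd).1
          (List.mem_map.mpr ⟨x, hx, by simp [hxk, hk]⟩)
      have htmap : t.map (fun pr => if pr.1 == k then (k, q.2 + c) else pr) = t := by
        calc t.map (fun pr => if pr.1 == k then (k, q.2 + c) else pr)
            = t.map id := List.map_congr_left (fun x hx => by simp [hnot x hx, id])
          _ = t := List.map_id t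
      rw [List.map_cons, if_pos (by simp [hk]), htmap]
      simp only [pvWs, List.map_cons, List.sum_cons, hq, hk]
      ring
    · rw [List.find?_cons_of_neg (by simp [hk])] at hf
      rw [List.map_cons, if_neg (by simp [hk])]
      simp only [pvWs, List.map_cons, List.sum_cons]
      have := ih q (List.nodup_cons.mp hnd).2 hf
      simp only [pvWs] at this
      rw [this]
      ring

-- inserting k ↦ getD k 0 + c adds c * h k to the weighted sum and preserves key nodup
lemma pvWs_insert (d : PySem.Dict (Int × Int) Int) (hn : d.keys.Nodup) (k : Int × Int)
    (c : Int) (h : Int × Int → Int) :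
    (d.insert k (d.getD k 0 + c)).keys.Nodup ∧
      pvWs (d.insert k (d.getD k 0 + c)).items h = pvWs d.items h + c * h k := by
  obtain ⟨l⟩ := d
  have hitems : (PySem.Dict.mk l : PySem.Dict (Int × Int) Int).items = l := rfl
  have hkeys : (PySem.Dict.mk l : PySem.Dict (Int × Int) Int).keys = l.map (·.1) := rfl
  rw [hkeys] at hn
  by_cases hc : (PySem.Dict.mk l : PySem.Dict (Int × Int) Int).contains k
  · obtain ⟨q, hq⟩ : ∃ q, l.find? (fun pr => pr.1 == k) = some q := by
      have : (l.find? (fun pr => pr.1 == k)).isSome := by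
        rw [List.find?_isSome]
        simpa [PySem.Dict.contains, List.any_eq_true] using hc
      exact Option.isSome_iff_exists.mp this
    have hget : (PySem.Dict.mk l : PySem.Dict (Int × Int) Int).getD k 0 = q.2 := by
      simp [PySem.Dict.getD, PySem.Dict.get?, hq]
    rw [PySem.Dict.insert, if_pos hc, hget]
    constructor
    · show ((l.map (fun pr => if pr.1 == k then (k, q.2 + c) else pr)).map (·.1)).Nodup
      have : (l.map (fun pr => if pr.1 == k then (k, q.2 + c) else pr)).map (·.1)
          = l.map (·.1) := by
        rw [List.map_map]
        apply List.map_congr_left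
        intro x _
        by_cases hx : x.1 = k <;> simp [hx]
      rw [this]; exact hn
    · exact pvWs_replace k c h l q hn hq
  · have hget : (PySem.Dict.mk l : PySem.Dict (Int × Int) Int).getD k 0 = 0 := by
      have : l.find? (fun pr => pr.1 == k) = none := by
        rw [List.find?_eq_none]
        intro x hx hxk
        apply hc
        simp only [PySem.Dict.contains]
        rw [List.any_eq_true]
        exact ⟨x, hx, hxk⟩
      simp [PySem.Dict.getD, PySem.Dict.get?, this]
    rw [PySem.Dict.insert, if_neg hc, hget]
    constructor
    · show ((l ++ [(k, 0 + c)]).map (·.1)).Nodup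
      rw [List.map_append]
      refine List.Nodup.append hn (by simp) ?_
      intro x hx hy
      simp only [List.map_cons, List.map_nil, List.mem_singleton] at hy
      subst hy
      obtain ⟨pr, hpr, hpx⟩ := List.mem_map.mp hx
      apply hc
      simp only [PySem.Dict.contains]
      rw [List.any_eq_true]
      exact ⟨pr, hpr, by simp [hpx]⟩
    · show pvWs (l ++ [(k, 0 + c)]) h = pvWs l h + c * h k
      simp only [pvWs, List.map_append, List.sum_append, List.map_cons, List.map_nil,
        List.sum_cons, List.sum_nil]
      ring

lemma pvWs_merge (h : Int × Int → Int) :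
    ∀ (adds : List ((Int × Int) × Int)) (d : PySem.Dict (Int × Int) Int), d.keys.Nodup →
      (adds.foldl (fun d kc => d.insert kc.1 (d.getD kc.1 0 + kc.2)) d).keys.Nodup ∧
      pvWs (adds.foldl (fun d kc => d.insert kc.1 (d.getD kc.1 0 + kc.2)) d).items h
        = pvWs d.items h + pvWs adds h := by
  intro adds
  induction adds with
  | nil => intro d hn; exact ⟨hn, by simp [pvWs]⟩
  | cons kc t ih =>
    intro d hn
    obtain ⟨hn', hws⟩ := pvWs_insert d hn kc.1 kc.2 h
    obtain ⟨hn'', hws'⟩ := ih (d.insert kc.1 (d.getD kc.1 0 + kc.2)) hn'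
    refine ⟨by simpa using hn'', ?_⟩
    rw [List.foldl_cons] at *
    rw [hws', hws]
    simp only [pvWs, List.map_cons, List.sum_cons]
    ring

lemma pvWs_cons_split (minProfit : Int) (gp : Int × Int) (rest : List (Int × Int)) :
    ∀ l : List ((Int × Int) × Int),
      pvWs l (pvF minProfit (gp :: rest))
        = pvResAdd minProfit gp.1 gp.2 l + pvWs (pvPicks gp.1 gp.2 l) (pvF minProfit rest)
          + pvWs l (pvF minProfit rest) := by
  intro l
  induction l with
  | nil => simp [pvWs, pvResAdd, pvPicks]
  | cons item t ih =>
    simp only [pvWs, pvResAdd, pvPicks, List.map_cons, List.sum_cons, List.filterMap_cons] at *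
    by_cases h1 : item.1.1 ≠ 0 ∧ item.1.1 ≥ gp.1
    · rw [if_pos h1]
      try simp only [List.map_cons, List.sum_cons]
      rw [ih]
      simp only [pvF, if_pos h1]
      by_cases h2 : item.1.2 + gp.2 ≥ minProfit
      · simp only [if_pos h2, List.map_cons, List.sum_cons]
        ring
      · simp only [if_neg h2, List.map_cons, List.sum_cons]
        ring
    · rw [if_neg h1]
      rw [ih]
      simp only [pvF, if_neg h1]
      ring

lemma pvB_inv (minProfit : Int) :
    ∀ (items : List (Int × Int)) (r : Int) (d : PySem.Dict (Int × Int) Int), d.keys.Nodup →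
      (items.foldl (pvStepB minProfit) (r, d)).1 = r + pvWs d.items (pvF minProfit items) := by
  intro items
  induction items with
  | nil =>
    intro r d _
    simp only [List.foldl_nil]
    have : pvWs d.items (pvF minProfit []) = 0 := by
      simp [pvWs, pvF]
    rw [this]; ring
  | cons gp rest ih =>
    intro r d hn
    rw [List.foldl_cons]
    have hstep : pvStepB minProfit (r, d) gp
        = (r + pvResAdd minProfit gp.1 gp.2 d.items,
           (pvPicks gp.1 gp.2 d.items).foldl
             (fun d kc => d.insert kc.1 (d.getD kc.1 0 + kc.2)) d) := by
      simp only [pvStepB]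
      rw [pvStepB_inner]
      simp
    rw [hstep]
    obtain ⟨hn', hws⟩ := pvWs_merge (pvF minProfit rest) (pvPicks gp.1 gp.2 d.items) d hn
    rw [ih _ _ hn', hws, pvWs_cons_split minProfit gp rest]
    ring

-- ===== VERDICT (by name: the statement is the Claim_ definition above) =====
theorem profitableSchemes1_spec : Claim_equal_profitableSchemes1 := by
  intro n minProfit group profit _ hpre
  unfold Spec_profitableSchemes1
  have hA := pvA_dfs group profit minProfit hpre n 0
  have hinit : (PySem.Dict.empty.insert ((n : Int), (0 : Int)) 1
      : PySem.Dict (Int × Int) Int).items = [((n, 0), 1)] := rfl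
  have hnd : (PySem.Dict.empty.insert ((n : Int), (0 : Int)) 1
      : PySem.Dict (Int × Int) Int).keys.Nodup := by
    show ((PySem.Dict.empty.insert ((n : Int), (0 : Int)) 1
      : PySem.Dict (Int × Int) Int).items.map (·.1)).Nodup
    rw [hinit]; simp
  have hB := pvB_inv minProfit (group.zip profit)
    (if minProfit = 0 then 1 else 0) (PySem.Dict.empty.insert (n, 0) 1) hnd
  rw [hinit] at hB
  simp only [pvWs, List.map_cons, List.map_nil, List.sum_cons, List.sum_nil, one_mul,
    add_zero] at hB
  simp only [profitableSchemes1, profitableSchemes1_alt]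
  rw [hB, hA]
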